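-- pv_equiv track=rewrite | github.com/moiseszeleny/LRSM-with-Spheno | sympy_calculations/DLRSM/FeynmanRules_senjanovic_H10_Z1_GM.py | generate_VSS_interactions
-- ===== SOURCE A (Python) =====
-- def generate_VSS_interactions(vector_boson, scalar_list1, scalar_list2, required_scalar=None):
--     """
--     Generates unique V S S interaction tuples (Vector, Scalar1, Scalar2).
--     Optionally ensures one of the scalars is the required_scalar.
--     """
--     interactions = set()
--     for S1 in scalar_list1:
--         for S2 in scalar_list2:
--             include = True
--             if required_scalar:
--                 include = (S1 == required_scalar or S2 == required_scalar)
--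
--             if include:
--                 # Keep the V S S order, sorting not needed here as order matters (V S S' vs V S' S)
--                 # If order doesn't matter use _sort_interaction_tuple
--                 interaction_tuple = (vector_boson, S1, S2)
--                 interactions.add(interaction_tuple)
--
--     # Sort the final list for consistency
--     return sorted(list(interactions), key=lambda t: tuple(map(str, t)))
-- ===== SOURCE B (Python) =====
-- def generate_VSS_interactions(vector_boson, scalar_list1, scalar_list2, required_scalar=None):
--     """Same result as A, but when required_scalar is given it constructs only the
--     matching pairs directly instead of filtering the full cartesian product."""
--     s1 = list(dict.fromkeys(scalar_list1))
--     s2 = list(dict.fromkeys(scalar_list2))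
--     if required_scalar:
--         pairs = []
--         if required_scalar in s1:
--             pairs += [(required_scalar, b) for b in s2]
--         if required_scalar in s2:
--             pairs += [(a, required_scalar) for a in s1 if a != required_scalar]
--     else:
--         pairs = [(a, b) for a in s1 for b in s2]
--     return sorted((vector_boson, a, b) for a, b in pairs)
-- ===== Notes on version B (the rewrite author's own statement) =====
-- stated objective: faster
-- what changed: B dedups each scalar list once and, when a (truthy) required_scalar is given, directly constructs only the matching pairs (required x list2 plus list1 x required) instead of scanning and filtering the full cartesian product; the sort then runs on the already duplicate-free list.
import Mathlib
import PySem

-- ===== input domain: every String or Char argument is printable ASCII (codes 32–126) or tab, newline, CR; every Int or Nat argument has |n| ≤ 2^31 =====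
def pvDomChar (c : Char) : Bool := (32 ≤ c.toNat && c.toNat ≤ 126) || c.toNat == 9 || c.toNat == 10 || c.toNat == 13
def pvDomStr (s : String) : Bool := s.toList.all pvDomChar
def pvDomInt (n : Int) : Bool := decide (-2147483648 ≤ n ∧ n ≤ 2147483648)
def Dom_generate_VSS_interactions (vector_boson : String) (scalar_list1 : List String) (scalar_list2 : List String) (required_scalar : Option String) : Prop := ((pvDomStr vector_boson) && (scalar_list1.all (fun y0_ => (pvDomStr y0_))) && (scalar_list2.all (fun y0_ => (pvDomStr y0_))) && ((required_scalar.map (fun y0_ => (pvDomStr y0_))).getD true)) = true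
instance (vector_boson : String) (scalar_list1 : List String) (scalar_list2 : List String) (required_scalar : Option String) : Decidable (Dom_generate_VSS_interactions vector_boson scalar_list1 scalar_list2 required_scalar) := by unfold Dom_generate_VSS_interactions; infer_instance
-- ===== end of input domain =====

-- ===== PORT A =====
-- B differs from A only in how the pair list is constructed (direct construction vs
-- full-product filter); equivalence of the RETURN value is what is proved.
-- Python's tuple comparison (the sort key tuple(map(str,t)), str identity on str) is
-- ported as lexicographic comparison of the component list [t.1, t.2.1, t.2.2],
-- which is exactly Python's tuple ordering on strings.
def generate_VSS_interactions (vector_boson : String) (scalar_list1 : List String) (scalar_list2 : List String) (required_scalar : Option String) : List (String × String × String) :=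
  let interactions : PySem.Set (String × String × String) :=
    scalar_list1.foldl (fun acc S1 =>
      scalar_list2.foldl (fun acc S2 =>
        let include_ : Bool :=
          match required_scalar with
          | none => true
          | some r => if r = "" then true else (S1 == r || S2 == r)
        if include_ then PySem.Set.add acc (vector_boson, S1, S2) else acc) acc)
      PySem.Set.empty
  @PySem.List.sorted _ (List String) List.instLinearOrder.toLT LinearOrder.toDecidableLT
    interactions (fun t => [t.1, t.2.1, t.2.2]) false

-- ===== PORT B =====
def generate_VSS_interactions_alt (vector_boson : String) (scalar_list1 : List String) (scalar_list2 : List String) (required_scalar : Option String) : List (String × String × String) :=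
  let s1 := PySem.List.dedup scalar_list1
  let s2 := PySem.List.dedup scalar_list2
  let pairs : List (String × String) :=
    match required_scalar with
    | some r =>
      if r = "" then s1.flatMap (fun a => s2.map (fun b => (a, b)))
      else
        (if s1.contains r then s2.map (fun b => (r, b)) else []) ++
        (if s2.contains r then (s1.filter (fun a => a ≠ r)).map (fun a => (a, r)) else [])
    | none => s1.flatMap (fun a => s2.map (fun b => (a, b)))
  @PySem.List.sorted _ (List String) List.instLinearOrder.toLT LinearOrder.toDecidableLT
    (pairs.map (fun p => (vector_boson, p.1, p.2))) (fun t => [t.1, t.2.1, t.2.2]) false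

-- ===== PRECONDITION & SPEC =====
def Spec_generate_VSS_interactions (vector_boson : String) (scalar_list1 : List String) (scalar_list2 : List String) (required_scalar : Option String) (out : List (String × String × String)) : Prop := out = generate_VSS_interactions_alt vector_boson scalar_list1 scalar_list2 required_scalar
instance (vector_boson : String) (scalar_list1 : List String) (scalar_list2 : List String) (required_scalar : Option String) (out : List (String × String × String)) : Decidable (Spec_generate_VSS_interactions vector_boson scalar_list1 scalar_list2 required_scalar out) := by unfold Spec_generate_VSS_interactions; infer_instance

-- ===== CLAIM (what is proved, stated in full; the proofs are below) =====
def Claim_equal_generate_VSS_interactions : Prop := ∀ (vector_boson : String) (scalar_list1 : List String) (scalar_list2 : List String) (required_scalar : Option String), Dom_generate_VSS_interactions vector_boson scalar_list1 scalar_list2 required_scalar → Spec_generate_VSS_interactions vector_boson scalar_list1 scalar_list2 required_scalar (generate_VSS_interactions vector_boson scalar_list1 scalar_list2 required_scalar)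

-- ===== LEMMAS AND PROOFS =====

-- the sort key used by both ports (Python's tuple comparison as list-lex comparison)
def pvKey (t : String × String × String) : List String := [t.1, t.2.1, t.2.2]

lemma pvKey_injective : Function.Injective pvKey := by
  rintro ⟨a, b, c⟩ ⟨d, e, f⟩ h
  simp [pvKey] at h
  simp [h.1, h.2.1, h.2.2]

lemma pv_trip_injective (v : String) :
    Function.Injective (fun q : String × String => (v, q.1, q.2)) := by
  rintro ⟨a, b⟩ ⟨c, d⟩ h
  simpa using h

-- a conditional-add loop is Set-building over the filtered, mapped list
lemma pv_foldl_addIf {α β : Type} [BEq α] (p : β → Bool) (f : β → α) (l : List β) (acc : List α) :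
    l.foldl (fun acc x => if p x then PySem.Set.add acc (f x) else acc) acc
      = ((l.filter p).map f).foldl PySem.Set.add acc := by
  induction l generalizing acc with
  | nil => simp
  | cons x xs ih => by_cases hp : p x <;> simp [hp, ih]

-- A's nested loop builds exactly set( [(v,a,b) for a in l1 for b in l2 if p a b] )
lemma pv_A_eq_ofList (v : String) (l1 l2 : List String) (p : String → String → Bool) :
    l1.foldl (fun acc S1 =>
      l2.foldl (fun acc S2 => if p S1 S2 then PySem.Set.add acc (v, S1, S2) else acc) acc) []
      = PySem.Set.ofList (l1.flatMap fun a => (l2.filter (p a)).map (fun b => (v, a, b))) := by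
  rw [PySem.Set.ofList_eq_foldl, List.foldl_flatMap]
  simp only [pv_foldl_addIf]

-- central equality: sorting A's set equals sorting B's directly constructed list,
-- provided B's pair list is duplicate-free and holds exactly the pairs A keeps
lemma pv_central (v : String) (l1 l2 : List String) (p : String → String → Bool)
    (pairs : List (String × String)) (hnd : pairs.Nodup)
    (hmem : ∀ q : String × String, q ∈ pairs ↔ q.1 ∈ l1 ∧ q.2 ∈ l2 ∧ p q.1 q.2 = true) :
    @PySem.List.sorted _ (List String) List.instLinearOrder.toLT LinearOrder.toDecidableLT
        (PySem.Set.ofList (l1.flatMap fun a => (l2.filter (p a)).map (fun b => (v, a, b))))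
        pvKey false
      = @PySem.List.sorted _ (List String) List.instLinearOrder.toLT LinearOrder.toDecidableLT
        (pairs.map fun q => (v, q.1, q.2)) pvKey false := by
  have hndL : (pairs.map fun q => (v, q.1, q.2)).Nodup := hnd.map (pv_trip_injective v)
  have hperm : (@PySem.List.sorted _ (List String) List.instLinearOrder.toLT LinearOrder.toDecidableLT
      (pairs.map fun q => (v, q.1, q.2)) pvKey false).Perm
      (PySem.Set.ofList (l1.flatMap fun a => (l2.filter (p a)).map (fun b => (v, a, b)))) := by
    refine (@PySem.List.sorted_perm _ (List String) List.instLinearOrder.toLT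
      LinearOrder.toDecidableLT _ pvKey false).trans ?_
    refine (List.perm_ext_iff_of_nodup hndL (PySem.Set.nodup_ofList _)).mpr ?_
    intro t
    simp only [PySem.Set.mem_ofList, List.mem_flatMap, List.mem_map, List.mem_filter]
    constructor
    · rintro ⟨q, hq, rfl⟩
      rcases (hmem q).mp hq with ⟨h1, h2, h3⟩
      exact ⟨q.1, h1, q.2, ⟨h2, h3⟩, rfl⟩
    · rintro ⟨a, ha, b, ⟨hb, hp⟩, rfl⟩
      exact ⟨(a, b), (hmem (a, b)).mpr ⟨ha, hb, hp⟩, rfl⟩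
  have hndS := hperm.nodup_iff.mpr (PySem.Set.nodup_ofList _)
  refine PySem.List.sorted_eq_of_perm_of_pairwise_lt _ _ pvKey hperm ?_
  exact ((PySem.List.sorted_pairwise ..).and hndS).imp
    (fun h => lt_of_le_of_ne h.1 (fun e => h.2 (pvKey_injective e)))

theorem pv_main (vector_boson : String) (scalar_list1 scalar_list2 : List String)
    (required_scalar : Option String) :
    generate_VSS_interactions vector_boson scalar_list1 scalar_list2 required_scalar
      = generate_VSS_interactions_alt vector_boson scalar_list1 scalar_list2 required_scalar := by
  cases required_scalar with
  | none =>
      show @PySem.List.sorted _ (List String) List.instLinearOrder.toLT LinearOrder.toDecidableLT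
          (scalar_list1.foldl (fun acc S1 => scalar_list2.foldl
            (fun acc S2 => if (fun (_ _ : String) => true) S1 S2 then
              PySem.Set.add acc (vector_boson, S1, S2) else acc) acc) [])
          pvKey false
        = generate_VSS_interactions_alt vector_boson scalar_list1 scalar_list2 none
      rw [pv_A_eq_ofList vector_boson scalar_list1 scalar_list2 (fun _ _ => true)]
      simp only [generate_VSS_interactions_alt]
      rw [show (fun (t : String × String × String) => [t.1, t.2.1, t.2.2]) = pvKey from rfl]
      refine pv_central _ _ _ _ _ ?_ ?_
      · exact (PySem.List.nodup_dedup scalar_list1).product (PySem.List.nodup_dedup scalar_list2)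
      · intro q
        simp [List.mem_flatMap]
        aesop
  | some r =>
      show @PySem.List.sorted _ (List String) List.instLinearOrder.toLT LinearOrder.toDecidableLT
          (scalar_list1.foldl (fun acc S1 => scalar_list2.foldl
            (fun acc S2 => if (fun (a b : String) => if r = "" then true else (a == r || b == r)) S1 S2 then
              PySem.Set.add acc (vector_boson, S1, S2) else acc) acc) [])
          pvKey false
        = generate_VSS_interactions_alt vector_boson scalar_list1 scalar_list2 (some r)
      rw [pv_A_eq_ofList vector_boson scalar_list1 scalar_list2
        (fun a b => if r = "" then true else (a == r || b == r))]
      by_cases hr : r = ""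
      · simp only [generate_VSS_interactions_alt, if_pos hr]
        rw [show (fun (t : String × String × String) => [t.1, t.2.1, t.2.2]) = pvKey from rfl]
        refine pv_central _ _ _ _ _ ?_ ?_
        · exact (PySem.List.nodup_dedup scalar_list1).product (PySem.List.nodup_dedup scalar_list2)
        · intro q
          simp [List.mem_flatMap]
          aesop
      · simp only [generate_VSS_interactions_alt, if_neg hr]
        rw [show (fun (t : String × String × String) => [t.1, t.2.1, t.2.2]) = pvKey from rfl]
        refine pv_central _ _ _ _ _ ?_ ?_
        · refine List.Nodup.append ?_ ?_ ?_
          · split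
            · exact (PySem.List.nodup_dedup scalar_list2).map
                (fun a b h => by simpa using h)
            · exact List.nodup_nil
          · split
            · exact ((PySem.List.nodup_dedup scalar_list1).filter _).map
                (fun a b h => by simpa using h)
            · exact List.nodup_nil
          · intro q hq1 hq2
            split at hq1
            · split at hq2
              · rcases List.mem_map.mp hq1 with ⟨b, _, rfl⟩
                rcases List.mem_map.mp hq2 with ⟨a, ha, h⟩
                have hne : a ≠ r := by simpa using (List.mem_filter.mp ha).2
                exact hne (by simpa using congrArg Prod.fst h)
              · simp at hq2
            · simp at hq1
        · rintro ⟨qa, qb⟩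
          by_cases h1 : (PySem.List.dedup scalar_list1).contains r <;>
          by_cases h2 : (PySem.List.dedup scalar_list2).contains r <;>
          by_cases hqa : qa = r <;>
          by_cases hqb : qb = r <;>
          · simp only [List.contains_iff_mem, PySem.List.mem_dedup] at h1 h2
            simp [h1, h2, hqa, hqb]
            try tauto

-- ===== VERDICT (by name: the statement is the Claim_ definition above) =====
theorem generate_VSS_interactions_spec : Claim_equal_generate_VSS_interactions := by
  intro v l1 l2 req _
  exact pv_main v l1 l2 req
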